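-- pv_equiv track=rewrite | github.com/threalwinky/simple-keylogger | server/convert_logs_to_data.py | parse_keylog_lines
-- ===== SOURCE A (Python) =====
-- def parse_keylog_lines(lines, line_width=20):
--     typed_text = []
--     cursor_pos = 0
--
--     for line in lines:
--         key_part = line.split()[0]
--
--         if len(key_part) == 1:
--             typed_text.insert(cursor_pos, key_part)
--             cursor_pos += 1
--         elif key_part == "Key.space":
--             typed_text.insert(cursor_pos, ' ')
--             cursor_pos += 1
--         elif key_part == "Key.enter":
--             typed_text.insert(cursor_pos, '\n')
--             cursor_pos += 1
--         elif key_part == "Key.backspace":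
--             if cursor_pos > 0:
--                 del typed_text[cursor_pos - 1]
--                 cursor_pos -= 1
--         elif key_part == "Key.delete":
--             if cursor_pos < len(typed_text):
--                 del typed_text[cursor_pos]
--         elif key_part == "Key.left":
--             cursor_pos = max(0, cursor_pos - 1)
--         elif key_part == "Key.right":
--             cursor_pos = min(len(typed_text), cursor_pos + 1)
--         elif key_part == "Key.up":
--             cursor_pos = max(0, cursor_pos - line_width)
--         elif key_part == "Key.down":
--             cursor_pos = min(len(typed_text), cursor_pos + line_width)
--
--     return ''.join(typed_text)
-- ===== SOURCE B (Python) =====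
-- def parse_keylog_lines(lines, line_width=20):
--     # Gap buffer: `left` holds the text before the cursor (in order),
--     # `right` holds the text after the cursor as a stack (nearest char last).
--     left, right = [], []
--     for line in lines:
--         key = line.split()[0]
--         if len(key) == 1:
--             left.append(key)
--         elif key == "Key.space":
--             left.append(' ')
--         elif key == "Key.enter":
--             left.append('\n')
--         elif key == "Key.backspace":
--             if left:
--                 left.pop()
--         elif key == "Key.delete":
--             if right:
--                 right.pop()
--         elif key == "Key.left":
--             if left:
--                 right.append(left.pop())
--         elif key == "Key.right":
--             if right:
--                 left.append(right.pop())
--         elif key == "Key.up":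
--             for _ in range(min(line_width, len(left))):
--                 right.append(left.pop())
--         elif key == "Key.down":
--             for _ in range(min(line_width, len(right))):
--                 left.append(right.pop())
--     return ''.join(left) + ''.join(reversed(right))
-- ===== Notes on version B (the rewrite author's own statement) =====
-- stated objective: alternative
-- what changed: Replaces A's single cursor-indexed list with positional insert/delete by a gap buffer - two stacks holding the text left and right of the cursor - so edits and cursor moves are constant-time stack operations instead of index arithmetic into one list.
-- outside the precondition, e.g. on parse_keylog_lines(['a a', 'Key.left', 'Key.up', 'Key.left', 'b b'], -3): A returns 'ab', B returns 'ba'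
import Mathlib
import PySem

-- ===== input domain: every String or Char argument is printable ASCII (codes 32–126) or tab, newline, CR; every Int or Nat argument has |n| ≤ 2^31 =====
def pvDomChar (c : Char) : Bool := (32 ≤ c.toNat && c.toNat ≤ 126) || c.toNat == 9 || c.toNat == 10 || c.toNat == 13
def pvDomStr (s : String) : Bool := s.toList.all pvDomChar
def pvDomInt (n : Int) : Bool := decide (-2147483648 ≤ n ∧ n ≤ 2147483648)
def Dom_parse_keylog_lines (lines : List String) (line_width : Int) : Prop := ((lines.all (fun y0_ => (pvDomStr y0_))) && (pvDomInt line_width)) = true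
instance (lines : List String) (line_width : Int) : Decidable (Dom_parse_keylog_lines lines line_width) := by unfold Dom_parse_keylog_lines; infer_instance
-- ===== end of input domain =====

-- B replaces A's cursor-indexed list with positional insert/delete by a gap buffer
-- (two stacks holding the text left and right of the cursor); objective: alternative.

-- ===== PORT A =====
-- one iteration of A's loop over `lines`; state = (typed_text, cursor_pos)
def pvStepA (line_width : Int) (st : List String × Int) (line : String) : List String × Int :=
  match PySem.Str.split₀ line with
  | [] => st  -- Python raises IndexError on `line.split()[0]` here; excluded by Pre_
  | key :: _ =>
    let typed := st.1
    let cursor := st.2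
    if PySem.Str.len key = 1 then (PySem.List.insert typed cursor key, cursor + 1)
    else if key = "Key.space" then (PySem.List.insert typed cursor " ", cursor + 1)
    else if key = "Key.enter" then (PySem.List.insert typed cursor "\n", cursor + 1)
    else if key = "Key.backspace" then
      if cursor > 0 then
        match PySem.List.pop? typed (cursor - 1) with
        | some (_, rest) => (rest, cursor - 1)
        | none => st  -- Python raises IndexError; excluded by Pre_
      else st
    else if key = "Key.delete" then
      if cursor < (typed.length : Int) then
        match PySem.List.pop? typed cursor with
        | some (_, rest) => (rest, cursor)
        | none => st  -- unreachable under the guard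
      else st
    else if key = "Key.left" then (typed, max 0 (cursor - 1))
    else if key = "Key.right" then (typed, min (typed.length : Int) (cursor + 1))
    else if key = "Key.up" then (typed, max 0 (cursor - line_width))
    else if key = "Key.down" then (typed, min (typed.length : Int) (cursor + line_width))
    else st

def parse_keylog_lines (lines : List String) (line_width : Int) : String :=
  PySem.Str.join "" (lines.foldl (pvStepA line_width) ([], 0)).1

-- ===== PORT B =====
-- move k characters from the left stack to the right stack (cursor left), and back
def pvMoveL : Nat → List String × List String → List String × List String
  | 0, st => st
  | _ + 1, ([], r) => ([], r)
  | k + 1, (x :: l, r) => pvMoveL k (l, x :: r)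

def pvMoveR : Nat → List String × List String → List String × List String
  | 0, st => st
  | _ + 1, (l, []) => (l, [])
  | k + 1, (l, x :: r) => pvMoveR k (x :: l, r)

-- one iteration of B's loop; state = (left stack (top = head), right stack (top = head))
def pvStepB (line_width : Int) (st : List String × List String) (line : String) :
    List String × List String :=
  match PySem.Str.split₀ line with
  | [] => st
  | key :: _ =>
    let left := st.1
    let right := st.2
    if PySem.Str.len key = 1 then (key :: left, right)
    else if key = "Key.space" then (" " :: left, right)
    else if key = "Key.enter" then ("\n" :: left, right)
    else if key = "Key.backspace" then
      match left with
      | [] => st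
      | _ :: l => (l, right)
    else if key = "Key.delete" then
      match right with
      | [] => st
      | _ :: r => (left, r)
    else if key = "Key.left" then
      match left with
      | [] => st
      | x :: l => (l, x :: right)
    else if key = "Key.right" then
      match right with
      | [] => st
      | x :: r => (x :: left, r)
    else if key = "Key.up" then pvMoveL (min line_width (left.length : Int)).toNat (left, right)
    else if key = "Key.down" then pvMoveR (min line_width (right.length : Int)).toNat (left, right)
    else st

def parse_keylog_lines_alt (lines : List String) (line_width : Int) : String :=
  let st := lines.foldl (pvStepB line_width) ([], [])
  PySem.Str.join "" (st.1.reverse ++ st.2)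

-- ===== PRECONDITION & SPEC =====
-- Pre_ excludes (a) lines whose split() is empty, where A raises IndexError on line.split()[0],
-- and (b) a negative line_width combined with a Key.up/Key.down line, where A's cursor can leave
-- [0, len] — A then raises IndexError on some such inputs and on the others returns values produced
-- by overshooting cursor arithmetic that is an accident of list indexing, not editor behaviour.
def Pre_parse_keylog_lines (lines : List String) (line_width : Int) : Prop :=
  (∀ line ∈ lines, PySem.Str.split₀ line ≠ []) ∧
  (0 ≤ line_width ∨ ∀ line ∈ lines,
    (PySem.Str.split₀ line).headD "" ≠ "Key.up" ∧ (PySem.Str.split₀ line).headD "" ≠ "Key.down")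
instance (lines : List String) (line_width : Int) : Decidable (Pre_parse_keylog_lines lines line_width) := by
  unfold Pre_parse_keylog_lines; infer_instance

def pvWitness_parse_keylog_lines : List String × Int :=
  (["h 12", "i", "Key.space", "Key.left", "Key.backspace", "Key.up", "Key.right"], 20)

def Spec_parse_keylog_lines (lines : List String) (line_width : Int) (out : String) : Prop := out = parse_keylog_lines_alt lines line_width
instance (lines : List String) (line_width : Int) (out : String) : Decidable (Spec_parse_keylog_lines lines line_width out) := by unfold Spec_parse_keylog_lines; infer_instance

-- ===== CLAIM (what is proved, stated in full; the proofs are below) =====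
def Claim_equal_parse_keylog_lines : Prop := ∀ (lines : List String) (line_width : Int), Dom_parse_keylog_lines lines line_width → Pre_parse_keylog_lines lines line_width → Spec_parse_keylog_lines lines line_width (parse_keylog_lines lines line_width)

-- ===== LEMMAS AND PROOFS =====

theorem pvMoveL_spec (k : Nat) (l r : List String) (hk : k ≤ l.length) :
    pvMoveL k (l, r) = (l.drop k, (l.take k).reverse ++ r) := by
  induction k generalizing l r with
  | zero => simp [pvMoveL]
  | succ k ih =>
    cases l with
    | nil => simp at hk
    | cons x l => simp [pvMoveL, ih l (x :: r) (by simpa using hk)]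

theorem pvMoveR_spec (k : Nat) (l r : List String) (hk : k ≤ r.length) :
    pvMoveR k (l, r) = ((r.take k).reverse ++ l, r.drop k) := by
  induction k generalizing l r with
  | zero => simp [pvMoveR]
  | succ k ih =>
    cases r with
    | nil => simp at hk
    | cons x r => simp [pvMoveR, ih (x :: l) r (by simpa using hk)]

theorem pvEraseMid {α : Type} (l r : List α) (x : α) :
    (l ++ x :: r).eraseIdx l.length = l ++ r := by
  induction l with
  | nil => simp
  | cons y l ih => simp [ih]

theorem pvPopMid (l r : List String) (x : String) :
    PySem.List.pop? (l.reverse ++ x :: r) (l.length : Int) = some (x, l.reverse ++ r) := by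
  have hl : l.length = l.reverse.length := by simp
  rw [hl, PySem.List.pop?_natCast _ l.reverse.length (by simp)]
  rw [pvEraseMid]
  rw [List.getElem_append_right (by simp)]
  simp

theorem pvIns (l r : List String) (v : String) :
    PySem.List.insert (l.reverse ++ r) (l.length : Int) v = l.reverse ++ v :: r := by
  rw [PySem.List.insert_natCast _ l.length v (by simp)]
  rw [List.take_left' (by simp), List.drop_left' (by simp)]

theorem pvStep_sim (lw : Int) (line : String) (l r : List String)
    (h1 : PySem.Str.split₀ line ≠ [])
    (h2 : 0 ≤ lw ∨ ((PySem.Str.split₀ line).headD "" ≠ "Key.up" ∧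
                    (PySem.Str.split₀ line).headD "" ≠ "Key.down")) :
    pvStepA lw (l.reverse ++ r, (l.length : Int)) line =
      ((pvStepB lw (l, r) line).1.reverse ++ (pvStepB lw (l, r) line).2,
       ((pvStepB lw (l, r) line).1.length : Int)) := by
  rcases hsp : PySem.Str.split₀ line with _ | ⟨key, rest⟩
  · exact absurd hsp h1
  · have h2' : 0 ≤ lw ∨ (key ≠ "Key.up" ∧ key ≠ "Key.down") := by
      simpa [hsp] using h2
    simp only [pvStepA, pvStepB, hsp]
    by_cases hlen : PySem.Str.len key = 1
    · rw [if_pos hlen, if_pos hlen]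
      simp [pvIns]
    · rw [if_neg hlen, if_neg hlen]
      by_cases hspace : key = "Key.space"
      · rw [if_pos hspace, if_pos hspace]
        simp [pvIns]
      · rw [if_neg hspace, if_neg hspace]
        by_cases henter : key = "Key.enter"
        · rw [if_pos henter, if_pos henter]
          simp [pvIns]
        · rw [if_neg henter, if_neg henter]
          by_cases hback : key = "Key.backspace"
          · rw [if_pos hback, if_pos hback]
            cases l with
            | nil => simp
            | cons x l' =>
              rw [if_pos (show ((((x :: l').length : Nat) : Int) > 0) from by
                simp only [List.length_cons]; push_cast; omega)]
              have hidx : (((x :: l').length : Nat) : Int) - 1 = (l'.length : Int) := by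
                simp only [List.length_cons]; push_cast; ring
              have hrev : (x :: l').reverse ++ r = l'.reverse ++ x :: r := by simp
              rw [hidx, hrev, pvPopMid]
          · rw [if_neg hback, if_neg hback]
            by_cases hdel : key = "Key.delete"
            · rw [if_pos hdel, if_pos hdel]
              cases r with
              | nil =>
                rw [if_neg (show ¬(((l.length : Nat) : Int) <
                  (((l.reverse ++ ([] : List String)).length : Nat) : Int)) from by simp)]
              | cons y r' =>
                rw [if_pos (show (((l.length : Nat) : Int) <
                      (((l.reverse ++ y :: r').length : Nat) : Int)) from by
                    simp only [List.length_append, List.length_reverse, List.length_cons]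
                    push_cast; omega)]
                rw [pvPopMid]
            · rw [if_neg hdel, if_neg hdel]
              by_cases hleft : key = "Key.left"
              · rw [if_pos hleft, if_pos hleft]
                cases l with
                | nil => simp
                | cons x l' =>
                  simp
              · rw [if_neg hleft, if_neg hleft]
                by_cases hright : key = "Key.right"
                · rw [if_pos hright, if_pos hright]
                  cases r with
                  | nil => simp
                  | cons y r' =>
                    simp
                · rw [if_neg hright, if_neg hright]
                  by_cases hup : key = "Key.up"
                  · have hlw : 0 ≤ lw := by
                      rcases h2' with h | h
                      · exact h
                      · exact absurd hup h.1
                    rw [if_pos hup, if_pos hup]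
                    have hk : (min lw ((l.length : Nat) : Int)).toNat ≤ l.length := by omega
                    rw [pvMoveL_spec _ l r hk]
                    simp only [Prod.ext_iff]
                    constructor
                    · rw [← List.append_assoc, ← List.reverse_append, List.take_append_drop]
                    · simp only [List.length_drop]
                      omega
                  · rw [if_neg hup, if_neg hup]
                    by_cases hdown : key = "Key.down"
                    · have hlw : 0 ≤ lw := by
                        rcases h2' with h | h
                        · exact h
                        · exact absurd hdown h.2
                      rw [if_pos hdown, if_pos hdown]
                      have hk : (min lw ((r.length : Nat) : Int)).toNat ≤ r.length := by omega
                      rw [pvMoveR_spec _ l r hk]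
                      simp only [Prod.ext_iff]
                      constructor
                      · rw [List.reverse_append, List.reverse_reverse, List.append_assoc,
                            List.take_append_drop]
                      · simp only [List.length_append, List.length_reverse, List.length_take]
                        push_cast
                        omega
                    · rw [if_neg hdown, if_neg hdown]

theorem pvFold_sim (lw : Int) (lines : List String)
    (h1 : ∀ line ∈ lines, PySem.Str.split₀ line ≠ [])
    (h2 : 0 ≤ lw ∨ ∀ line ∈ lines,
      (PySem.Str.split₀ line).headD "" ≠ "Key.up" ∧ (PySem.Str.split₀ line).headD "" ≠ "Key.down") :
    ∀ l r : List String,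
      lines.foldl (pvStepA lw) (l.reverse ++ r, (l.length : Int)) =
        ((lines.foldl (pvStepB lw) (l, r)).1.reverse ++ (lines.foldl (pvStepB lw) (l, r)).2,
         ((lines.foldl (pvStepB lw) (l, r)).1.length : Int)) := by
  induction lines with
  | nil => intro l r; rfl
  | cons line rest ih =>
    intro l r
    have hline : PySem.Str.split₀ line ≠ [] := h1 line (by simp)
    have h2' : 0 ≤ lw ∨ ((PySem.Str.split₀ line).headD "" ≠ "Key.up" ∧
        (PySem.Str.split₀ line).headD "" ≠ "Key.down") := by
      rcases h2 with h | h
      · exact Or.inl h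
      · exact Or.inr (h line (by simp))
    simp only [List.foldl_cons, pvStep_sim lw line l r hline h2']
    exact ih (fun x hx => h1 x (by simp [hx]))
      (by rcases h2 with h | h
          · exact Or.inl h
          · exact Or.inr fun x hx => h x (by simp [hx]))
      (pvStepB lw (l, r) line).1 (pvStepB lw (l, r) line).2

-- ===== VERDICT (by name: the statement is the Claim_ definition above) =====
theorem parse_keylog_lines_spec : Claim_equal_parse_keylog_lines := by
  intro lines lw _ hpre
  unfold Spec_parse_keylog_lines parse_keylog_lines parse_keylog_lines_alt
  have h := pvFold_sim lw lines hpre.1 hpre.2 [] []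
  simp only [List.reverse_nil, List.nil_append, List.length_nil, Nat.cast_zero] at h
  rw [h]
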